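-- pv_equiv track=rewrite | github.com/xiayh17/codon_verifier_ext | codon_verifier/metrics.py | homopolymers
-- ===== SOURCE A (Python) =====
-- from typing import Dict, List, Tuple, Optional
--
-- def homopolymers(seq: str, min_len: int = 6) -> List[Tuple[str,int,int]]:
--     s = seq.upper().replace("U","T")
--     res = []
--     i = 0
--     while i < len(s):
--         j = i+1
--         while j < len(s) and s[j] == s[i]:
--             j += 1
--         L = j - i
--         if L >= min_len:
--             res.append((s[i], i, L))
--         i = j
--     return res
-- ===== SOURCE B (Python) =====
-- def homopolymers(seq, min_len=6):
--     s = seq.upper().replace("U", "T")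
--     # run-length encode s: scan right-to-left keeping the newest run at the end,
--     # then reverse once to get the runs in left-to-right order
--     rev_runs = []
--     for ch in reversed(s):
--         if rev_runs and rev_runs[-1][0] == ch:
--             rev_runs[-1] = (ch, rev_runs[-1][1] + 1)
--         else:
--             rev_runs.append((ch, 1))
--     runs = rev_runs[::-1]
--     res = []
--     pos = 0
--     for ch, L in runs:
--         if L >= min_len:
--             res.append((ch, pos, L))
--         pos += L
--     return res
-- ===== Notes on version B (the rewrite author's own statement) =====
-- stated objective: alternative
-- what changed: Replaces A's nested while-loops (inner scan to find each run's end) with a two-phase pipeline: a single right-to-left pass building a run-length encoding, then a scan over the runs emitting those of length >= min_len with their positions.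
import Mathlib
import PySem

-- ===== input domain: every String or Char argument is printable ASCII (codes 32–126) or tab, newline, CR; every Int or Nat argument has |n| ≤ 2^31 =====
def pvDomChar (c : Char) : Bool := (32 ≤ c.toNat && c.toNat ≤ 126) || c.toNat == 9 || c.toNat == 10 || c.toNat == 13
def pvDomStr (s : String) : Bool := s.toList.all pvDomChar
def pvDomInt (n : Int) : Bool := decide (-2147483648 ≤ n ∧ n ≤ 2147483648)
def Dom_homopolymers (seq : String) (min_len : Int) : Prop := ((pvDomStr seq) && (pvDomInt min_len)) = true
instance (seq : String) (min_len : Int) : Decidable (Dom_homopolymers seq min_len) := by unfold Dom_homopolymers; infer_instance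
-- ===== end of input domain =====

-- B replaces A's nested while-loops by a run-length-encode pass followed by an emitting scan
-- (alternative decomposition, same O(n) cost); equivalence is proved for all inputs.

-- ===== PORT A =====
-- inner while: 'while j < len(s) and s[j] == s[i]: j += 1' (index j always in range when read)
def pvAInner (cs : List Char) (c : Char) (j : Nat) : Nat :=
  if j < cs.length ∧ cs.getD j ' ' = c then pvAInner cs c (j + 1) else j
termination_by cs.length - j
decreasing_by omega

theorem pvAInner_ge (cs : List Char) (c : Char) (j : Nat) : j ≤ pvAInner cs c j := by
  unfold pvAInner
  split
  · have := pvAInner_ge cs c (j + 1); omega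
  · exact le_refl j
termination_by cs.length - j
decreasing_by rename_i h; omega

-- outer while over i, appending to res
def pvALoop (cs : List Char) (min_len : Int) (i : Nat) (res : List (String × Int × Int)) :
    List (String × Int × Int) :=
  if h : i < cs.length then
    let j := pvAInner cs (cs.getD i ' ') (i + 1)
    let L := j - i
    let res' := if min_len ≤ (L : Int) then res ++ [(String.ofList [cs.getD i ' '], (i : Int), (L : Int))] else res
    pvALoop cs min_len j res'
  else res
termination_by cs.length - i
decreasing_by
  have := pvAInner_ge cs (cs.getD i ' ') (i + 1); omega

def homopolymers (seq : String) (min_len : Int) : List (String × Int × Int) :=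
  pvALoop (PySem.Str.replace (PySem.Str.upper seq) "U" "T").toList min_len 0 []

-- ===== PORT B =====
-- one step of the right-to-left RLE pass: newest run kept at the END of rev_runs
def pvAddRunEnd (runs : List (Char × Nat)) (ch : Char) : List (Char × Nat) :=
  match runs.getLast? with
  | some (c, n) => if c = ch then runs.dropLast ++ [(ch, n + 1)] else runs ++ [(ch, 1)]
  | none => [(ch, 1)]

def homopolymers_alt (seq : String) (min_len : Int) : List (String × Int × Int) :=
  ((((PySem.Str.replace (PySem.Str.upper seq) "U" "T").toList.reverse.foldl pvAddRunEnd []).reverse).foldl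
    (fun (st : List (String × Int × Int) × Nat) (r : Char × Nat) =>
      ((if min_len ≤ (r.2 : Int) then st.1 ++ [(String.ofList [r.1], (st.2 : Int), (r.2 : Int))] else st.1),
        st.2 + r.2))
    ([], 0)).1

-- ===== PRECONDITION & SPEC =====
def Spec_homopolymers (seq : String) (min_len : Int) (out : List (String × Int × Int)) : Prop := out = homopolymers_alt seq min_len
instance (seq : String) (min_len : Int) (out : List (String × Int × Int)) : Decidable (Spec_homopolymers seq min_len out) := by unfold Spec_homopolymers; infer_instance

-- ===== CLAIM (what is proved, stated in full; the proofs are below) =====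
def Claim_equal_homopolymers : Prop := ∀ (seq : String) (min_len : Int), Dom_homopolymers seq min_len → Spec_homopolymers seq min_len (homopolymers seq min_len)

-- ===== LEMMAS AND PROOFS =====

-- proof-side helpers: head-first RLE step and a recursive emitter
def pvAddRun (ch : Char) (runs : List (Char × Nat)) : List (Char × Nat) :=
  match runs with
  | (c, n) :: rest => if c = ch then (ch, n + 1) :: rest else (ch, 1) :: (c, n) :: rest
  | [] => [(ch, 1)]

def pvEmit (min_len : Int) : List (Char × Nat) → Nat → List (String × Int × Int)
  | [], _ => []
  | (c, L) :: rest, pos =>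
    (if min_len ≤ (L : Int) then [(String.ofList [c], (pos : Int), (L : Int))] else []) ++
      pvEmit min_len rest (pos + L)

theorem pvAddRunEnd_reverse (runs : List (Char × Nat)) (ch : Char) :
    pvAddRunEnd runs.reverse ch = (pvAddRun ch runs).reverse := by
  cases runs with
  | nil => rfl
  | cons p rest =>
    obtain ⟨c, n⟩ := p
    simp [pvAddRunEnd, pvAddRun]
    split <;> simp

theorem pvRLE_aux (cs : List Char) :
    cs.foldr (fun x y => pvAddRunEnd y x) [] = (cs.foldr pvAddRun []).reverse := by
  induction cs with
  | nil => rfl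
  | cons c rest ih =>
    simp only [List.foldr_cons, ih]
    rw [pvAddRunEnd_reverse]

theorem pvRLE_eq (cs : List Char) :
    (cs.reverse.foldl pvAddRunEnd []).reverse = cs.foldr pvAddRun [] := by
  rw [List.foldl_reverse, pvRLE_aux, List.reverse_reverse]

theorem pvRuns_cons (c : Char) (cs : List Char) :
    (c :: cs).foldr pvAddRun [] =
      (c, 1 + (cs.takeWhile (· = c)).length) ::
        (cs.drop (cs.takeWhile (· = c)).length).foldr pvAddRun [] := by
  induction cs generalizing c with
  | nil => rfl
  | cons d rest ih =>
    by_cases hdc : d = c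
    · subst hdc
      have h1 : ((d :: rest).takeWhile (· = d)) = d :: rest.takeWhile (· = d) := by
        simp
      rw [List.foldr_cons, ih d]
      simp only [h1, List.length_cons, List.drop_succ_cons]
      simp [pvAddRun]
      omega
    · have h1 : ((d :: rest).takeWhile (· = c)) = [] := by
        simp [hdc]
      simp only [h1, List.length_nil, List.drop_zero]
      rw [List.foldr_cons]
      rcases h2 : (d :: rest).foldr pvAddRun [] with _ | ⟨⟨e, m⟩, tail⟩
      · rw [ih d] at h2; exact absurd h2 (by simp)
      · have he : e = d := by
          rw [ih d] at h2
          exact (Prod.mk.injEq .. ▸ (List.cons.injEq .. ▸ h2).1).1.symm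
        simp [pvAddRun, he, hdc]

theorem pvAInner_eq (cs : List Char) (c : Char) (j : Nat) :
    pvAInner cs c j = j + ((cs.drop j).takeWhile (· = c)).length := by
  unfold pvAInner
  split
  · rename_i h
    obtain ⟨hj, hc⟩ := h
    have hd : cs.drop j = cs[j] :: cs.drop (j + 1) := by
      rw [List.drop_eq_getElem_cons hj]
    have hget : cs.getD j ' ' = cs[j] := List.getD_eq_getElem cs ' ' hj
    rw [hget] at hc
    have hrec := pvAInner_eq cs c (j + 1)
    rw [hd, List.takeWhile_cons, hc, hrec]
    simp only [decide_true, if_true, List.length_cons]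
    omega
  · rename_i h
    by_cases hj : j < cs.length
    · have hget : cs.getD j ' ' = cs[j] := List.getD_eq_getElem cs ' ' hj
      have hc : ¬ cs[j] = c := by
        intro hh; exact h ⟨hj, hget.trans hh⟩
      have hd : cs.drop j = cs[j] :: cs.drop (j + 1) := List.drop_eq_getElem_cons hj
      rw [hd, List.takeWhile_cons]
      simp [hc]
    · have : cs.drop j = [] := List.drop_eq_nil_of_le (by omega)
      simp [this]
termination_by cs.length - j
decreasing_by omega

theorem pvALoop_eq (cs : List Char) (m : Int) (i : Nat) (res : List (String × Int × Int)) :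
    pvALoop cs m i res = res ++ pvEmit m ((cs.drop i).foldr pvAddRun []) i := by
  unfold pvALoop
  split
  · rename_i hi
    have hget : cs.getD i ' ' = cs[i] := List.getD_eq_getElem cs ' ' hi
    have hd : cs.drop i = cs[i] :: cs.drop (i + 1) := List.drop_eq_getElem_cons hi
    set t := ((cs.drop (i + 1)).takeWhile (· = cs[i])).length with ht
    have hj : pvAInner cs (cs.getD i ' ') (i + 1) = i + 1 + t := by
      rw [hget, pvAInner_eq]
    have hruns : (cs.drop i).foldr pvAddRun [] =
        (cs[i], 1 + t) :: (cs.drop (i + 1 + t)).foldr pvAddRun [] := by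
      rw [hd, pvRuns_cons, List.drop_drop]
    rw [hj, hruns]
    have hrec := pvALoop_eq cs m (i + 1 + t)
    simp only [hget, pvEmit]
    have hL : i + 1 + t - i = 1 + t := by omega
    rw [hL]
    split
    · rw [hrec]
      simp only [List.append_assoc, List.singleton_append]
      congr 3
      omega
    · rw [hrec]
      simp only [List.nil_append]
      congr 2
      omega
  · rename_i hi
    have : cs.drop i = [] := List.drop_eq_nil_of_le (by omega)
    simp [this, pvEmit]
termination_by cs.length - i
decreasing_by
  have := pvAInner_ge cs (cs.getD i ' ') (i + 1); omega

theorem pvFoldl_emit (m : Int) (runs : List (Char × Nat)) (res : List (String × Int × Int)) (pos : Nat) :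
    (runs.foldl
      (fun (st : List (String × Int × Int) × Nat) (r : Char × Nat) =>
        ((if m ≤ (r.2 : Int) then st.1 ++ [(String.ofList [r.1], (st.2 : Int), (r.2 : Int))] else st.1),
          st.2 + r.2))
      (res, pos)).1 = res ++ pvEmit m runs pos := by
  induction runs generalizing res pos with
  | nil => simp [pvEmit]
  | cons r rest ih =>
    obtain ⟨c, L⟩ := r
    simp only [List.foldl_cons, pvEmit]
    split <;> simp [ih]

-- ===== VERDICT (by name: the statement is the Claim_ definition above) =====
theorem homopolymers_spec : Claim_equal_homopolymers := by
  intro seq min_len _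
  unfold Spec_homopolymers homopolymers homopolymers_alt
  rw [pvALoop_eq, pvRLE_eq, pvFoldl_emit]
  simp
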